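-- pv_equiv track=rewrite | github.com/pypi-data/pypi-mirror-364 | packages/codiac/codiac-1.0.0-py3-none-any.whl/CoDIAC/PDBHelper.py | return_chain_list
-- ===== SOURCE A (Python) =====
-- from string import digits
--
-- def return_chain_list(row):
--     """
--     Return the chains of a PDB_ID as a list of characters
--     if there are two entries for the PDB_ID, return as a list of lists, with Uniprot IDs to help sort which is which
--     """
--     chains_list = []
--
--     chains = row['CHAIN_ID']
--     chains= chains.replace("'", '')
--     chains = chains.replace(" ", '')
--     remove_digits = str.maketrans('', '', digits)
--     chains= chains.translate(remove_digits)
--     chains = chains.replace(",", '')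
--     chain_vals = []
--     for ind in range(0, len(chains)):
--         chain_vals.append(chains[ind])
--     return chain_vals
-- ===== SOURCE B (Python) =====
-- from string import digits
--
-- def return_chain_list(row):
--     remove = set("' ,") | set(digits)
--     return [c for c in row['CHAIN_ID'] if c not in remove]
-- ===== Notes on version B (the rewrite author's own statement) =====
-- stated objective: simpler
-- what changed: Replaces A's four sequential replace/translate passes plus a separate index-and-append copy loop with a single filtering pass over the string using one removal set built once.
import Mathlib
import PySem

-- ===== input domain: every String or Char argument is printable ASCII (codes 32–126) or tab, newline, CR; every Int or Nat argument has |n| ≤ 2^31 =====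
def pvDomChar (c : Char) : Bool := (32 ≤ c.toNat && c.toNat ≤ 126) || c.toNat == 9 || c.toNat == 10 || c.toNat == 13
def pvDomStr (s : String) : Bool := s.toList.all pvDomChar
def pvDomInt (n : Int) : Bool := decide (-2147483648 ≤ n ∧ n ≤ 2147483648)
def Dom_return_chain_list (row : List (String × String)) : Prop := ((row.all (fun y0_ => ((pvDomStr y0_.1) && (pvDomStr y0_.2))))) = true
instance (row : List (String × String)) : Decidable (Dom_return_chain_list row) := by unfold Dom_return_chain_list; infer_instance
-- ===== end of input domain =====

-- B replaces A's four sequential replace/translate cleaning passes and its index-copy loop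
-- with a single filtering pass over the string using one removal set; return value only.
-- ===== PORT A =====
-- string.digits = '0123456789' (exact: the translate table deletes exactly these ASCII chars)
def pyDigits : List Char := ['0','1','2','3','4','5','6','7','8','9']

def return_chain_list (row : List (String × String)) : List String :=
  match PySem.Dict.get? (PySem.Dict.mk row) "CHAIN_ID" with
  | none => []   -- Python raises KeyError here; excluded by Pre_
  | some chains0 =>
    let chains1 := PySem.Str.replace chains0 "'" ""
    let chains2 := PySem.Str.replace chains1 " " ""
    -- chains.translate(str.maketrans('', '', digits)) deletes each digit char (exact on this domain)
    let chains3 := String.ofList (chains2.toList.filter (fun c => !(pyDigits.contains c)))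
    let chains4 := PySem.Str.replace chains3 "," ""
    (PySem.List.pyRange 0 (PySem.Str.len chains4) 1).foldl
      (fun acc ind => acc ++ [String.ofList [PySem.List.pyGetD chains4.toList ind ' ']]) []

-- ===== PORT B =====
def return_chain_list_alt (row : List (String × String)) : List String :=
  match PySem.Dict.get? (PySem.Dict.mk row) "CHAIN_ID" with
  | none => []   -- Python raises KeyError here; excluded by Pre_
  | some s =>
    let remove : PySem.Set Char :=
      PySem.Set.union (PySem.Set.ofList ['\'', ' ', ',']) ['0','1','2','3','4','5','6','7','8','9']
    (s.toList.filter (fun c => !(PySem.Set.contains remove c))).map (fun c => String.ofList [c])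

-- ===== PRECONDITION & SPEC =====
-- Pre_: row must carry the key "CHAIN_ID" (first-match lookup); otherwise A raises KeyError.
def Pre_return_chain_list (row : List (String × String)) : Prop :=
  (PySem.Dict.mk row).contains "CHAIN_ID" = true
instance (row : List (String × String)) : Decidable (Pre_return_chain_list row) := by
  unfold Pre_return_chain_list; infer_instance
def pvWitness_return_chain_list : (List (String × String)) := [("CHAIN_ID", "A,B '1'")]

def Spec_return_chain_list (row : List (String × String)) (out : List String) : Prop := out = return_chain_list_alt row
instance (row : List (String × String)) (out : List String) : Decidable (Spec_return_chain_list row out) := by unfold Spec_return_chain_list; infer_instance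

-- ===== CLAIM (what is proved, stated in full; the proofs are below) =====
def Claim_equal_return_chain_list : Prop := ∀ (row : List (String × String)), Dom_return_chain_list row → Pre_return_chain_list row → Spec_return_chain_list row (return_chain_list row)

-- ===== LEMMAS AND PROOFS =====
-- replace(old, '') with a single-char old deletes exactly that character: a filter.
theorem pvGoSingle (c : Char) : ∀ (fuel : Nat) (l acc : List Char), l.length ≤ fuel →
    PySem.Chars.replace.go [c] [] fuel l acc = acc.reverse ++ l.filter (fun x => !(x == c)) := by
  intro fuel
  induction fuel with
  | zero => intro l acc h; simp at h; subst h; simp [PySem.Chars.replace.go]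
  | succ n ih =>
    intro l acc h
    cases l with
    | nil => simp [PySem.Chars.replace.go]
    | cons x t =>
      rw [PySem.Chars.replace.go]
      simp only [List.isPrefixOf, List.filter_cons]
      by_cases hx : x = c
      · subst hx
        simp only [BEq.rfl, Bool.true_and]
        simp [ih t _ (by simpa using h)]
      · have hcx : (c == x) = false := by simp [Ne.symm hx]
        simp [hcx, hx, ih t _ (by simpa using h)]

theorem pvReplaceSingle (c : Char) (l : List Char) :
    PySem.Chars.replace l [c] [] = l.filter (fun x => !(x == c)) := by
  rw [PySem.Chars.replace]
  simp [pvGoSingle c l.length l [] (le_refl _)]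

-- A's index-copy loop over a string is the map to singleton strings.
theorem pvCopyLoop (u : String) :
    (PySem.List.pyRange 0 (PySem.Str.len u) 1).foldl
      (fun acc ind => acc ++ [String.ofList [PySem.List.pyGetD u.toList ind ' ']]) []
    = u.toList.map (fun c => String.ofList [c]) := by
  rw [PySem.List.foldl_append_singleton_eq_map (fun ind => String.ofList [PySem.List.pyGetD u.toList ind ' '])]
  rw [show (fun ind => String.ofList [PySem.List.pyGetD u.toList ind ' '])
      = (fun c => String.ofList [c]) ∘ (fun j => PySem.List.pyGetD u.toList j ' ') from rfl]
  rw [← List.map_map]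
  rw [PySem.Str.len_eq, show ((u.toList.length : Int)) = ((u.toList.length : Nat) : Int) from rfl]
  rw [PySem.List.map_pyGetD_pyRange_zero']
  simp

-- A's four cleaning passes compose to B's one-set filter.
theorem pvCleanEq (s : String) :
    (PySem.Str.replace
      (String.ofList
        (List.filter (fun c => !pyDigits.contains c)
          (PySem.Str.replace (PySem.Str.replace s "'" "") " " "").toList))
      "," "").toList
    = List.filter
        (fun c =>
          !((PySem.Set.ofList ['\'', ' ', ',']).union ['0','1','2','3','4','5','6','7','8','9']).contains c)
        s.toList := by
  simp only [PySem.Str.toList_replace, String.toList_ofList,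
    show ("," : String).toList = [','] from rfl, show ("" : String).toList = [] from rfl,
    show ("'" : String).toList = ['\''] from rfl, show (" " : String).toList = [' '] from rfl]
  rw [pvReplaceSingle, pvReplaceSingle, pvReplaceSingle]
  simp only [List.filter_filter]
  apply List.filter_congr
  intro c _
  rw [show (PySem.Set.ofList ['\'', ' ', ',']).union ['0','1','2','3','4','5','6','7','8','9']
      = ['\'', ' ', ',','0','1','2','3','4','5','6','7','8','9'] from by decide]
  simp only [pyDigits, PySem.Set.contains, List.contains_cons, List.contains_nil, Bool.not_or,
    Bool.beq_eq_decide_eq, Bool.or_false]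
  simp [Bool.and_comm, Bool.and_assoc, Bool.and_left_comm]


-- ===== VERDICT (by name: the statement is the Claim_ definition above) =====
theorem return_chain_list_spec : Claim_equal_return_chain_list := by
  intro row _ hpre
  unfold Spec_return_chain_list return_chain_list return_chain_list_alt
  cases h : PySem.Dict.get? (PySem.Dict.mk row) "CHAIN_ID" with
  | none =>
    exfalso
    have := hpre
    unfold Pre_return_chain_list at this
    rw [PySem.Dict.contains_eq_isSome_get?, h] at this
    simp at this
  | some s =>
    simp only
    rw [pvCopyLoop, pvCleanEq]
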